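-- pv_equiv track=rewrite | github.com/Kendall-Salazar/portal-empleados | backend/scheduler_engine.py | _extract_rotation_token_from_week
-- ===== SOURCE A (Python) =====
-- from collections import Counter
--
-- ROTATION_HISTORY_CORE_DAYS = ("Vie", "Lun", "Mar", "Mié", "Jue")
--
-- IGNORED_ROTATION_SHIFTS = frozenset({"OFF", "VAC", "PERM", "N_22-05"})
--
-- HEAVY_EXTENDED_SHIFTS = frozenset({
--     "J_07-17",
--     "J_08-18",
--     "J_09-19",
--     "J_10-20",
--     "E1_07-18",
--     "E2_08-19",
--     "T4_08-16",
-- })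
--
-- SHIFTS = {
--     "OFF": set(),
--     # VAC: Vacation. PERM: Permission/Permiso.
--     # CRITICAL: These must NOT be assigned automatically. Only via fixed_shifts.
--     # We treat them as valid shift keys, but constrain to 0 unless fixed.
--     "VAC": set(),
--     "PERM": set(),
--     "N_22-05": set([22, 23, 24, 25, 26, 27, 28]),  # 22:00-05:00 (7h)
--     "T1_05-13": set(range(5, 13)),     # 05:00-13:00 (8h)
--     "T2_06-14": set(range(6, 14)),     # 06:00-14:00 (8h)
--     "T3_07-15": set(range(7, 15)),     # 07:00-15:00 (8h)
--     "T4_08-16": set(range(8, 16)),     # 08:00-16:00 (8h)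
--     "T8_13-20": set(range(13, 20)),    # 13:00-20:00 (7h)
--     "T10_15-22": set(range(15, 22)),   # 15:00-22:00 (7h)
--     "T11_12-20": set(range(12, 20)),   # 12:00-20:00 (8h)
--     "T13_16-22": set(range(16, 22)),   # 16:00-22:00 (6h)
--     "T16_05-14": set(range(5, 14)),    # 05:00-14:00 (9h) - NEW for short staffed mornings
--
--     # NEW 10-HOUR SHIFTS (Added to solve 4,3,4 peak feasibility)
--     "J_06-16": set(range(6, 16)),      # 06:00-16:00 (10h)
--     "J_07-17": set(range(7, 17)),      # 07:00-17:00 (10h)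
--     "J_08-18": set(range(8, 18)),      # 08:00-18:00 (10h)
--     "J_09-19": set(range(9, 19)),      # 09:00-19:00 (10h)
--     "J_10-20": set(range(10, 20)),     # 10:00-20:00 (10h)
--
--     # NEW 11-HOUR SHIFTS (Bridging Morning/Afternoon precisely)
--     "E1_07-18": set(range(7, 18)),     # 07:00-18:00 (11h)
--     "E2_08-19": set(range(8, 19)),     # 08:00-19:00 (11h)
--     "T17_16-23": set(range(16, 23)),   # 16:00-23:00 (7h, Mixed)
--
--     "X_07-19": set(range(7, 19)),      # 07:00-19:00 (12h) - EXTRA FOR FEASIBILITY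
--     "X_08-20": set(range(8, 20)),      # 08:00-20:00 (12h)
--
--     "D1_05-13": set(range(5, 13)),     # 05:00-13:00 (8h)
--     "D2_14-22": set(range(14, 22)),    # 14:00-22:00 (8h)
--     "D3_15-23": set(range(15, 23)),    # 15:00-23:00 (8h)
--     "D4_13-22": set(range(13, 22)),    # 13:00-22:00 (9h, Dominical PM)
--     "R1_07-11": set(range(7, 11)),     # 07:00-11:00 (4h) - Refuerzo Medio Tiempo
--     "R2_16-20": set(range(16, 20)),    # 16:00-20:00 (4h) - Refuerzo Medio Tiempo
--     "Q1_05-11+17-20": set(range(5, 11)) | set(range(17, 20)),  # 5am-11am + 5pm-8pm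
--     "Q2_07-11+17-20": set(range(7, 11)) | set(range(17, 20)),  # 7-11am + 5-8pm (Optimal for peak)
--     "Q3_05-11+17-22": set(range(5, 11)) | set(range(17, 22)),  # 5am-11am + 5pm-10pm (11h, covers night)
-- }
--
-- def _rotation_token_for_shift(shift_name: str, employee_data: dict):
--     if shift_name not in SHIFTS or shift_name in IGNORED_ROTATION_SHIFTS:
--         return None
--     if shift_name.startswith("Q") or shift_name.startswith("X_") or shift_name.startswith("J_"):
--         return None
--     if shift_name in HEAVY_EXTENDED_SHIFTS:
--         return None
--
--     shift_hours = SHIFTS.get(shift_name, set())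
--     if not shift_hours:
--         return None
--
--     if employee_data.get("gender") == "F":
--         return "AM" if min(shift_hours) < 12 else "PM"
--
--     return shift_name
--
-- def _extract_rotation_token_from_week(employee_data: dict, weekly_schedule: dict, ignored_days=None):
--     tokens = []
--     ignored_days = set(ignored_days or [])
--     for day in ROTATION_HISTORY_CORE_DAYS:
--         if day in ignored_days:
--             continue
--         token = _rotation_token_for_shift(weekly_schedule.get(day), employee_data)
--         if token:
--             tokens.append(token)
--
--     if not tokens:
--         return None
--
--     counts = Counter(tokens)
--     top_count = max(counts.values())
--     for token in reversed(tokens):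
--         if counts[token] == top_count:
--             return token
--     return tokens[-1]
-- ===== SOURCE B (Python) =====
-- # B: one streaming pass -- running counts + online best (no tokens list, no Counter,
-- # no reverse rescan); eligibility via a precomputed shift->AM/PM table.
-- _CORE_DAYS = ("Vie", "Lun", "Mar", "Mié", "Jue")
--
-- # For each shift eligible for rotation history, its AM/PM kind (min start hour < 12 -> AM).
-- _TOKEN_KIND = {
--     "T1_05-13": "AM", "T2_06-14": "AM", "T3_07-15": "AM", "T16_05-14": "AM",
--     "D1_05-13": "AM", "R1_07-11": "AM",
--     "T8_13-20": "PM", "T10_15-22": "PM", "T11_12-20": "PM", "T13_16-22": "PM",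
--     "T17_16-23": "PM", "D2_14-22": "PM", "D3_15-23": "PM", "D4_13-22": "PM",
--     "R2_16-20": "PM",
-- }
--
-- def _extract_rotation_token_from_week(employee_data, weekly_schedule, ignored_days=None):
--     # A token's running count reaches its final count exactly at its last occurrence,
--     # so updating on `count >= best_count` yields the most frequent token with the
--     # latest last occurrence -- A's rule -- in a single forward pass.
--     skip = set(ignored_days or [])
--     female = employee_data.get("gender") == "F"
--     counts = {}
--     best = None
--     best_count = 0
--     for day in _CORE_DAYS:
--         if day in skip:
--             continue
--         shift = weekly_schedule.get(day)
--         kind = _TOKEN_KIND.get(shift)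
--         if kind is None:
--             continue
--         token = kind if female else shift
--         c = counts.get(token, 0) + 1
--         counts[token] = c
--         if c >= best_count:
--             best_count = c
--             best = token
--     return best
-- ===== Notes on version B (the rewrite author's own statement) =====
-- stated objective: alternative
-- what changed: B never materializes the token list: it makes one streaming pass over the days keeping a running count per token and an online best updated whenever a token's running count reaches the current maximum, which provably equals A's three-stage pipeline (collect tokens, Counter + max of values, reversed rescan) because a token's running count hits its final count exactly at its last occurrence; eligibility is a precomputed shift->AM/PM table instead of A's SHIFTS/sets/min chain.
import Mathlib
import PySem

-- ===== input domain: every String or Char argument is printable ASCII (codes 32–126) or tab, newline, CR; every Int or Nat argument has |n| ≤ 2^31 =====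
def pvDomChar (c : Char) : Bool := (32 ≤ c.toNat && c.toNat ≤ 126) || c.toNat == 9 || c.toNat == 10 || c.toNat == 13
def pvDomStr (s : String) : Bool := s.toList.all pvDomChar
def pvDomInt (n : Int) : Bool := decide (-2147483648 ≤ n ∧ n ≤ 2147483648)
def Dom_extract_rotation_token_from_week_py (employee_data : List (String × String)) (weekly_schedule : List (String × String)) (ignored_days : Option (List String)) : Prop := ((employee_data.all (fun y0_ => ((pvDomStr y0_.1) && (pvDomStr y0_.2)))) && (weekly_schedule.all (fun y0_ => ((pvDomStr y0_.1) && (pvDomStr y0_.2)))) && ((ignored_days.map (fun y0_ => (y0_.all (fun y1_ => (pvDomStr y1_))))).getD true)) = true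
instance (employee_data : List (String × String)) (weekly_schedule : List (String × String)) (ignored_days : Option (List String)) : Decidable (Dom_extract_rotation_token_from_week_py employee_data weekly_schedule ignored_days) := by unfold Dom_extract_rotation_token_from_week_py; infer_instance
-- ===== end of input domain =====

-- B replaces A's three-stage pipeline (collect token list, Counter + max of values, reversed
-- rescan) by ONE streaming pass keeping running counts and an online best, and A's per-shift
-- eligibility chain by a precomputed shift→AM/PM table (objective: alternative decomposition).

-- ===== PORT A =====
def ROTATION_HISTORY_CORE_DAYS_py : List String := ["Vie", "Lun", "Mar", "Mié", "Jue"]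

def IGNORED_ROTATION_SHIFTS_py : PySem.Set String :=
  PySem.Set.ofList ["OFF", "VAC", "PERM", "N_22-05"]

def HEAVY_EXTENDED_SHIFTS_py : PySem.Set String :=
  PySem.Set.ofList ["J_07-17", "J_08-18", "J_09-19", "J_10-20", "E1_07-18", "E2_08-19", "T4_08-16"]

def SHIFTS_py : PySem.Dict String (PySem.Set Int) := PySem.Dict.ofList [
  ("OFF", (PySem.Set.empty : PySem.Set Int)),
  ("VAC", (PySem.Set.empty : PySem.Set Int)),
  ("PERM", (PySem.Set.empty : PySem.Set Int)),
  ("N_22-05", PySem.Set.ofList ([22, 23, 24, 25, 26, 27, 28] : List Int)),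
  ("T1_05-13", PySem.Set.ofList (PySem.List.pyRange 5 13 1)),
  ("T2_06-14", PySem.Set.ofList (PySem.List.pyRange 6 14 1)),
  ("T3_07-15", PySem.Set.ofList (PySem.List.pyRange 7 15 1)),
  ("T4_08-16", PySem.Set.ofList (PySem.List.pyRange 8 16 1)),
  ("T8_13-20", PySem.Set.ofList (PySem.List.pyRange 13 20 1)),
  ("T10_15-22", PySem.Set.ofList (PySem.List.pyRange 15 22 1)),
  ("T11_12-20", PySem.Set.ofList (PySem.List.pyRange 12 20 1)),
  ("T13_16-22", PySem.Set.ofList (PySem.List.pyRange 16 22 1)),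
  ("T16_05-14", PySem.Set.ofList (PySem.List.pyRange 5 14 1)),
  ("J_06-16", PySem.Set.ofList (PySem.List.pyRange 6 16 1)),
  ("J_07-17", PySem.Set.ofList (PySem.List.pyRange 7 17 1)),
  ("J_08-18", PySem.Set.ofList (PySem.List.pyRange 8 18 1)),
  ("J_09-19", PySem.Set.ofList (PySem.List.pyRange 9 19 1)),
  ("J_10-20", PySem.Set.ofList (PySem.List.pyRange 10 20 1)),
  ("E1_07-18", PySem.Set.ofList (PySem.List.pyRange 7 18 1)),
  ("E2_08-19", PySem.Set.ofList (PySem.List.pyRange 8 19 1)),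
  ("T17_16-23", PySem.Set.ofList (PySem.List.pyRange 16 23 1)),
  ("X_07-19", PySem.Set.ofList (PySem.List.pyRange 7 19 1)),
  ("X_08-20", PySem.Set.ofList (PySem.List.pyRange 8 20 1)),
  ("D1_05-13", PySem.Set.ofList (PySem.List.pyRange 5 13 1)),
  ("D2_14-22", PySem.Set.ofList (PySem.List.pyRange 14 22 1)),
  ("D3_15-23", PySem.Set.ofList (PySem.List.pyRange 15 23 1)),
  ("D4_13-22", PySem.Set.ofList (PySem.List.pyRange 13 22 1)),
  ("R1_07-11", PySem.Set.ofList (PySem.List.pyRange 7 11 1)),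
  ("R2_16-20", PySem.Set.ofList (PySem.List.pyRange 16 20 1)),
  ("Q1_05-11+17-20", PySem.Set.union (PySem.Set.ofList (PySem.List.pyRange 5 11 1)) (PySem.List.pyRange 17 20 1)),
  ("Q2_07-11+17-20", PySem.Set.union (PySem.Set.ofList (PySem.List.pyRange 7 11 1)) (PySem.List.pyRange 17 20 1)),
  ("Q3_05-11+17-22", PySem.Set.union (PySem.Set.ofList (PySem.List.pyRange 5 11 1)) (PySem.List.pyRange 17 22 1))]

-- _rotation_token_for_shift; shift_name may be Python None (weekly_schedule.get of a missing day):
-- None is not a key of SHIFTS, so the first guard returns None.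
def rotation_token_for_shift_py (shift_name : Option String) (employee_data : List (String × String)) : Option String :=
  match shift_name with
  | none => none
  | some s =>
    if !(SHIFTS_py.contains s) || IGNORED_ROTATION_SHIFTS_py.contains s then none
    else if PySem.Str.startswith s "Q" || PySem.Str.startswith s "X_" || PySem.Str.startswith s "J_" then none
    else if HEAVY_EXTENDED_SHIFTS_py.contains s then none
    else
      let shift_hours : PySem.Set Int := SHIFTS_py.getD s PySem.Set.empty
      if shift_hours = [] then none    -- `if not shift_hours:`
      else if (PySem.Dict.mk employee_data).get? "gender" == some "F" then
        match PySem.List.min? shift_hours (fun x => x) with  -- min(shift_hours); nonempty here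
        | some m => some (if m < 12 then "AM" else "PM")
        | none => none
      else some s

def extract_rotation_token_from_week_py (employee_data : List (String × String)) (weekly_schedule : List (String × String)) (ignored_days : Option (List String)) : Option String :=
  let ignored : PySem.Set String := PySem.Set.ofList (ignored_days.getD [])  -- set(ignored_days or [])
  let tokens : List String := ROTATION_HISTORY_CORE_DAYS_py.foldl (fun acc day =>
    if ignored.contains day then acc
    else match rotation_token_for_shift_py ((PySem.Dict.mk weekly_schedule).get? day) employee_data with
      | some t => if t = "" then acc else acc ++ [t]   -- `if token:` truthiness on a str
      | none => acc) []
  if tokens = [] then none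
  else
    let counts : PySem.Dict String Int := PySem.Dict.counter tokens
    match PySem.List.max? counts.values (fun x => x) with
    | none => none   -- unreachable: tokens ≠ [] so counts has a value (Python max would raise on empty)
    | some top =>
      match tokens.reverse.find? (fun t => counts.getD t 0 == top) with
      | some t => some t
      | none => PySem.List.pyGet? tokens (-1)   -- `return tokens[-1]` (unreachable)

-- ===== PORT B =====
def CORE_DAYS_alt : List String := ["Vie", "Lun", "Mar", "Mié", "Jue"]

def TOKEN_KIND_alt : PySem.Dict String String := PySem.Dict.ofList [
  ("T1_05-13", "AM"), ("T2_06-14", "AM"), ("T3_07-15", "AM"), ("T16_05-14", "AM"),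
  ("D1_05-13", "AM"), ("R1_07-11", "AM"),
  ("T8_13-20", "PM"), ("T10_15-22", "PM"), ("T11_12-20", "PM"), ("T13_16-22", "PM"),
  ("T17_16-23", "PM"), ("D2_14-22", "PM"), ("D3_15-23", "PM"), ("D4_13-22", "PM"),
  ("R2_16-20", "PM")]

-- single streaming pass: state = (counts, best, best_count)
def extract_rotation_token_from_week_py_alt (employee_data : List (String × String)) (weekly_schedule : List (String × String)) (ignored_days : Option (List String)) : Option String :=
  let skip : PySem.Set String := PySem.Set.ofList (ignored_days.getD [])
  let female : Bool := (PySem.Dict.mk employee_data).get? "gender" == some "F"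
  let st : PySem.Dict String Int × Option String × Int :=
    CORE_DAYS_alt.foldl (fun s day =>
      if skip.contains day then s
      else match (PySem.Dict.mk weekly_schedule).get? day with
        | none => s                                   -- missing day: _TOKEN_KIND.get(None) is None
        | some shift =>
          match TOKEN_KIND_alt.get? shift with
          | none => s                                 -- ineligible shift: continue
          | some kind =>
            let token := if female then kind else shift
            let c := s.1.getD token 0 + 1
            let counts := s.1.insert token c
            if s.2.2 ≤ c then (counts, some token, c) else (counts, s.2.1, s.2.2))
      (PySem.Dict.empty, none, 0)
  st.2.1

-- ===== PRECONDITION & SPEC =====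
def Spec_extract_rotation_token_from_week_py (employee_data : List (String × String)) (weekly_schedule : List (String × String)) (ignored_days : Option (List String)) (out : Option String) : Prop := out = extract_rotation_token_from_week_py_alt employee_data weekly_schedule ignored_days
instance (employee_data : List (String × String)) (weekly_schedule : List (String × String)) (ignored_days : Option (List String)) (out : Option String) : Decidable (Spec_extract_rotation_token_from_week_py employee_data weekly_schedule ignored_days out) := by unfold Spec_extract_rotation_token_from_week_py; infer_instance

-- ===== CLAIM (what is proved, stated in full; the proofs are below) =====
def Claim_equal_extract_rotation_token_from_week_py : Prop := ∀ (employee_data : List (String × String)) (weekly_schedule : List (String × String)) (ignored_days : Option (List String)), Dom_extract_rotation_token_from_week_py employee_data weekly_schedule ignored_days → Spec_extract_rotation_token_from_week_py employee_data weekly_schedule ignored_days (extract_rotation_token_from_week_py employee_data weekly_schedule ignored_days)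

-- ===== LEMMAS AND PROOFS =====
def allKeys : List String := ["OFF","VAC","PERM","N_22-05","T1_05-13","T2_06-14","T3_07-15","T4_08-16","T8_13-20","T10_15-22","T11_12-20","T13_16-22","T16_05-14","J_06-16","J_07-17","J_08-18","J_09-19","J_10-20","E1_07-18","E2_08-19","T17_16-23","X_07-19","X_08-20","D1_05-13","D2_14-22","D3_15-23","D4_13-22","R1_07-11","R2_16-20","Q1_05-11+17-20","Q2_07-11+17-20","Q3_05-11+17-22"]

def tokCore (s : String) (g : Bool) : Option String :=
  if !(SHIFTS_py.contains s) || IGNORED_ROTATION_SHIFTS_py.contains s then none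
  else if PySem.Str.startswith s "Q" || PySem.Str.startswith s "X_" || PySem.Str.startswith s "J_" then none
  else if HEAVY_EXTENDED_SHIFTS_py.contains s then none
  else
    let shift_hours : PySem.Set Int := SHIFTS_py.getD s PySem.Set.empty
    if shift_hours = [] then none
    else if g then
      match PySem.List.min? shift_hours (fun x => x) with
      | some m => some (if m < 12 then "AM" else "PM")
      | none => none
    else some s

def tokSpec (s : String) (g : Bool) : Option String :=
  (TOKEN_KIND_alt.get? s).map (fun kind => if g then kind else s)

theorem tok_abs (employee_data : List (String × String)) (s : String) :
    rotation_token_for_shift_py (some s) employee_data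
      = tokCore s ((PySem.Dict.mk employee_data).get? "gender" == some "F") := rfl

set_option maxRecDepth 8192 in
theorem tok_all (g : Bool) :
    allKeys.all (fun s =>
      (match tokCore s g with
        | some t => if t = "" then none else some t
        | none => (none : Option String)) == tokSpec s g) = true := by
  cases g <;> decide

theorem pv_token_eq (employee_data : List (String × String)) (shift : String) :
    (match rotation_token_for_shift_py (some shift) employee_data with
      | some t => if t = "" then none else some t
      | none => (none : Option String))
    = (TOKEN_KIND_alt.get? shift).map
        (fun kind => if (PySem.Dict.mk employee_data).get? "gender" == some "F" then kind else shift) := by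
  rw [tok_abs]
  show _ = tokSpec shift ((PySem.Dict.mk employee_data).get? "gender" == some "F")
  generalize ((PySem.Dict.mk employee_data).get? "gender" == some "F") = g
  by_cases hs : shift ∈ allKeys
  · have h := List.all_eq_true.mp (tok_all g) shift hs
    exact eq_of_beq h
  · have hk : SHIFTS_py.keys = allKeys := by decide
    have hc : SHIFTS_py.contains shift = false := by
      rw [PySem.Dict.contains_eq_decide_mem_keys, hk]
      simpa using hs
    have hk2 : TOKEN_KIND_alt.keys = ["T1_05-13","T2_06-14","T3_07-15","T16_05-14","D1_05-13","R1_07-11","T8_13-20","T10_15-22","T11_12-20","T13_16-22","T17_16-23","D2_14-22","D3_15-23","D4_13-22","R2_16-20"] := by decide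
    have hn : TOKEN_KIND_alt.get? shift = none := by
      rw [PySem.Dict.get?_eq_none_iff_not_mem_keys, hk2]
      intro h
      apply hs
      simp only [allKeys, List.mem_cons, List.not_mem_nil, or_false] at h ⊢
      tauto
    simp [tokCore, tokSpec, hc, hn]

-- the streaming step of B on a single produced token
def stepTok (s : PySem.Dict String Int × Option String × Int) (token : String) :
    PySem.Dict String Int × Option String × Int :=
  let c := s.1.getD token 0 + 1
  let counts := s.1.insert token c
  if s.2.2 ≤ c then (counts, some token, c) else (counts, s.2.1, s.2.2)

-- the token a day contributes (none = day skipped / no eligible shift)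
def tokenOf (female : Bool) (weekly_schedule : List (String × String)) (skip : PySem.Set String) (day : String) : Option String :=
  if skip.contains day then none
  else match (PySem.Dict.mk weekly_schedule).get? day with
    | none => none
    | some shift => (TOKEN_KIND_alt.get? shift).map (fun kind => if female then kind else shift)

-- the count of u in l as an Int
def cInt (l : List String) (u : String) : Int := (l.count u : Int)

theorem fold_opt {σ : Type} (f : String → Option String) (step : σ → String → σ) :
    ∀ (days : List String) (s : σ),
      days.foldl (fun s d => match f d with | none => s | some t => step s t) s
      = (days.flatMap (fun d => (f d).toList)).foldl step s := by
  intro days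
  induction days with
  | nil => intro s; rfl
  | cons d rest ih =>
    intro s
    rw [List.foldl_cons, List.flatMap_cons, List.foldl_append]
    cases f d <;> simp [ih]

theorem tokensA_flatMap (f : String → Option String) :
    ∀ (days : List String) (acc : List String),
      days.foldl (fun acc d => match f d with | none => acc | some t => acc ++ [t]) acc
      = acc ++ days.flatMap (fun d => (f d).toList) := by
  intro days
  induction days with
  | nil => intro acc; simp
  | cons d rest ih =>
    intro acc
    rw [List.foldl_cons, List.flatMap_cons]
    cases f d <;> simp [ih]

theorem cInt_append_singleton (l : List String) (x u : String) :
    cInt (l ++ [x]) u = cInt l u + (if u = x then 1 else 0) := by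
  by_cases h : u = x <;>
    simp [cInt, List.count_append, h, List.count_eq_zero]

theorem find?_congr_mem {α : Type} (p q : α → Bool) (l : List α)
    (h : ∀ u ∈ l, p u = q u) : l.find? p = l.find? q := by
  induction l with
  | nil => rfl
  | cons a t ih =>
    have ha := h a (List.mem_cons_self)
    simp only [List.find?]
    rw [ha]
    cases q a
    · exact ih (fun u hu => h u (List.mem_cons_of_mem _ hu))
    · rfl

theorem stream_inv : ∀ (l : List String), l ≠ [] →
    ∃ cnt M t,
      l.foldl stepTok ((PySem.Dict.empty : PySem.Dict String Int), (none : Option String), (0 : Int)) = (cnt, some t, M) ∧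
      (∀ u, cnt.getD u 0 = cInt l u) ∧
      (∃ u ∈ l, cInt l u = M) ∧
      (∀ u ∈ l, cInt l u ≤ M) ∧
      l.reverse.find? (fun u => cInt l u == M) = some t := by
  intro l
  induction l using List.reverseRecOn with
  | nil => intro h; exact absurd rfl h
  | append_singleton l x ih =>
    intro _
    rcases eq_or_ne l [] with rfl | hne
    · refine ⟨PySem.Dict.empty.insert x 1, 1, x, ?_, ?_, ⟨x, by simp, by simp [cInt]⟩, ?_, ?_⟩
      · simp [stepTok]
      · intro u
        rw [PySem.Dict.getD_insert]
        by_cases h : u = x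
        · simp [cInt, h]
        · have h0 : List.count u [x] = 0 := List.count_eq_zero.mpr (by simp [h])
          simp [cInt, h, h0]
      · intro u hu
        simp at hu
        simp [hu, cInt]
      · simp [cInt]
    · obtain ⟨cnt, M, t, hfold, hcnt, ⟨u0, hu0m, hu0⟩, hmax, hfind⟩ := ih hne
      have hx : cnt.getD x 0 + 1 = cInt (l ++ [x]) x := by
        rw [hcnt x, cInt_append_singleton]; simp
      have hcnt' : ∀ u, (cnt.insert x (cnt.getD x 0 + 1)).getD u 0 = cInt (l ++ [x]) u := by
        intro u
        rw [PySem.Dict.getD_insert]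
        by_cases h : u = x
        · subst h; simp [hx]
        · simp [hcnt u, cInt_append_singleton, h]
      rw [List.foldl_append, hfold, List.foldl_cons, List.foldl_nil]
      by_cases hge : M ≤ cnt.getD x 0 + 1
      · -- update: new best is x with count c
        refine ⟨cnt.insert x (cnt.getD x 0 + 1), cnt.getD x 0 + 1, x, ?_, hcnt', ?_, ?_, ?_⟩
        · simp [stepTok, hge]
        · exact ⟨x, by simp, hx.symm⟩
        · intro u hu
          rcases List.mem_append.mp hu with hu | hu
          · by_cases h : u = x
            · subst h; rw [← hx]
            · rw [cInt_append_singleton]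
              simp [h]
              exact le_trans (hmax u hu) hge
          · simp at hu; subst hu; rw [← hx]
        · rw [List.reverse_append]
          simp only [List.reverse_cons, List.reverse_nil, List.nil_append, List.cons_append,
            List.find?]
          rw [← hx]
          simp
      · -- no update: best stays t, count M
        rw [not_le] at hge
        have hcx : cInt l x + 1 < M := by rw [← hcnt x]; exact hge
        have hu0x : u0 ≠ x := by
          intro h; subst h
          have := hcx; rw [hu0] at this; omega
        refine ⟨cnt.insert x (cnt.getD x 0 + 1), M, t, ?_, hcnt', ?_, ?_, ?_⟩
        · simp only [stepTok]
          rw [if_neg (by omega)]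
        · refine ⟨u0, List.mem_append_left _ hu0m, ?_⟩
          rw [cInt_append_singleton]
          simp [hu0x, hu0]
        · intro u hu
          rcases List.mem_append.mp hu with hu | hu
          · by_cases h : u = x
            · subst h
              rw [cInt_append_singleton]
              simp; omega
            · rw [cInt_append_singleton]; simp [h]
              exact hmax u hu
          · simp at hu; subst hu
            rw [cInt_append_singleton]; simp
            omega
        · rw [List.reverse_append]
          simp only [List.reverse_cons, List.reverse_nil, List.nil_append, List.cons_append,
            List.find?]
          have hxf : (cInt (l ++ [x]) x == M) = false := by
            rw [cInt_append_singleton]; simp; omega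
          rw [hxf]
          rw [find?_congr_mem _ (fun u => cInt l u == M)]
          · exact hfind
          · intro u hu
            have hul : u ∈ l := by simpa using List.mem_reverse.mp hu
            by_cases h : u = x
            · subst h
              rw [hxf]
              symm
              simp
              omega
            · rw [cInt_append_singleton]; simp [h]

theorem max?_id_congr_mem (xs ys : List Int) (h : ∀ v, v ∈ xs ↔ v ∈ ys) :
    PySem.List.max? xs (fun y => y) = PySem.List.max? ys (fun y => y) := by
  cases hx : PySem.List.max? xs (fun y => y) with
  | none =>
    rw [PySem.List.max?_eq_none_iff] at hx
    subst hx
    cases hy : PySem.List.max? ys (fun y => y) with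
    | none => rfl
    | some m =>
      have := PySem.List.max?_mem hy
      rw [← h] at this
      simp at this
  | some m =>
    have hm := PySem.List.max?_mem hx
    cases hy : PySem.List.max? ys (fun y => y) with
    | none =>
      rw [PySem.List.max?_eq_none_iff] at hy
      subst hy
      rw [h] at hm
      simp at hm
    | some m' =>
      have hm' := PySem.List.max?_mem hy
      have h1 := PySem.List.max?_isMax hx
      have h2 := PySem.List.max?_isMax hy
      have : m = m' := le_antisymm (h2 m ((h m).mp hm)) (h1 m' ((h m').mpr hm'))
      rw [this]

theorem pv_max_counter (l : List String) :
    PySem.List.max? (PySem.Dict.counter l).values (fun y => y)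
      = PySem.List.max? (l.map (cInt l)) (fun y => y) := by
  have hv : (PySem.Dict.counter l).values
      = (PySem.Set.ofList l).map (fun k => ((List.count k l : Nat) : Int)) := by
    have := PySem.Dict.items_counter l
    simp [PySem.Dict.values, this]
  rw [hv]
  apply max?_id_congr_mem
  intro v
  simp only [List.mem_map, PySem.Set.mem_ofList, cInt]

-- A's selection over the token list equals B's streaming fold
theorem pv_sel_eq (l : List String) :
    (if l = [] then none
     else
      match PySem.List.max? (PySem.Dict.counter l).values (fun x => x) with
      | none => none
      | some top =>
        match l.reverse.find? (fun t => (PySem.Dict.counter l).getD t 0 == top) with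
        | some t => some t
        | none => PySem.List.pyGet? l (-1))
    = (l.foldl stepTok ((PySem.Dict.empty : PySem.Dict String Int), (none : Option String), (0 : Int))).2.1 := by
  rcases eq_or_ne l [] with rfl | hne
  · rfl
  · rw [if_neg hne]
    obtain ⟨cnt, M, t, hfold, _, ⟨u0, hu0m, hu0⟩, hmax, hfind⟩ := stream_inv l hne
    rw [hfold]
    have hMmem : M ∈ l.map (cInt l) := List.mem_map.mpr ⟨u0, hu0m, hu0⟩
    have hmax' : PySem.List.max? (l.map (cInt l)) (fun y => y) = some M := by
      cases hy : PySem.List.max? (l.map (cInt l)) (fun y => y) with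
      | none =>
        rw [PySem.List.max?_eq_none_iff] at hy
        rw [hy] at hMmem; simp at hMmem
      | some m' =>
        have hm' := PySem.List.max?_mem hy
        obtain ⟨u, hum, hu⟩ := List.mem_map.mp hm'
        have h1 : m' ≤ M := hu ▸ hmax u hum
        have h2 : M ≤ m' := PySem.List.max?_isMax hy M hMmem
        rw [le_antisymm h1 h2]
    rw [pv_max_counter, hmax']
    have hpred : (fun u => (PySem.Dict.counter l).getD u 0 == M)
        = (fun u => cInt l u == M) := by
      funext u
      rw [PySem.Dict.getD_counter]
      simp [cInt, List.count]
    simp only [hpred, hfind]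

-- ===== VERDICT (by name: the statement is the Claim_ definition above) =====
theorem extract_rotation_token_from_week_py_spec : Claim_equal_extract_rotation_token_from_week_py := by
  intro ed ws ig _
  unfold Spec_extract_rotation_token_from_week_py
  have hfunA : (fun (acc : List String) (day : String) =>
      if (PySem.Set.ofList (ig.getD [])).contains day then acc
      else match rotation_token_for_shift_py ((PySem.Dict.mk ws).get? day) ed with
        | some t => if t = "" then acc else acc ++ [t]
        | none => acc)
    = (fun (acc : List String) (day : String) =>
      match tokenOf ((PySem.Dict.mk ed).get? "gender" == some "F") ws (PySem.Set.ofList (ig.getD [])) day with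
      | none => acc
      | some t => acc ++ [t]) := by
    funext acc day
    unfold tokenOf
    by_cases h : day ∈ PySem.Set.ofList (ig.getD [])
    · simp [h]
    · rw [if_neg (by simpa using h), if_neg (by simpa using h)]
      cases hws : (PySem.Dict.mk ws).get? day with
      | none => rfl
      | some shift =>
        have htok := pv_token_eq ed shift
        cases hkind : TOKEN_KIND_alt.get? shift with
        | none =>
          rw [hkind] at htok
          simp only [Option.map_none] at htok
          cases hA : rotation_token_for_shift_py (some shift) ed with
          | none => simp [hkind]
          | some t =>
            rw [hA] at htok
            by_cases ht : t = ""
            · simp [ht, hkind]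
            · simp [ht] at htok
        | some kind =>
          rw [hkind] at htok
          simp only [Option.map_some] at htok
          cases hA : rotation_token_for_shift_py (some shift) ed with
          | none => rw [hA] at htok; simp at htok
          | some t =>
            rw [hA] at htok
            by_cases ht : t = ""
            · rw [ht] at htok; simp at htok
            · simp [ht] at htok
              subst htok
              simp [hkind, ht]
  have hfunB : (fun (s : PySem.Dict String Int × Option String × Int) (day : String) =>
      if (PySem.Set.ofList (ig.getD [])).contains day then s
      else match (PySem.Dict.mk ws).get? day with
        | none => s
        | some shift =>
          match TOKEN_KIND_alt.get? shift with
          | none => s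
          | some kind =>
            let token := if ((PySem.Dict.mk ed).get? "gender" == some "F") then kind else shift
            let c := s.1.getD token 0 + 1
            let counts := s.1.insert token c
            if s.2.2 ≤ c then (counts, some token, c) else (counts, s.2.1, s.2.2))
    = (fun (s : PySem.Dict String Int × Option String × Int) (day : String) =>
      match tokenOf ((PySem.Dict.mk ed).get? "gender" == some "F") ws (PySem.Set.ofList (ig.getD [])) day with
      | none => s
      | some t => stepTok s t) := by
    funext s day
    unfold tokenOf
    by_cases h : day ∈ PySem.Set.ofList (ig.getD [])
    · simp [h]
    · rw [if_neg (by simpa using h), if_neg (by simpa using h)]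
      cases (PySem.Dict.mk ws).get? day with
      | none => rfl
      | some shift =>
        show (match TOKEN_KIND_alt.get? shift with
              | none => s
              | some kind =>
                let token := if ((PySem.Dict.mk ed).get? "gender" == some "F") then kind else shift
                let c := s.1.getD token 0 + 1
                let counts := s.1.insert token c
                if s.2.2 ≤ c then (counts, some token, c) else (counts, s.2.1, s.2.2))
            = match (TOKEN_KIND_alt.get? shift).map
                (fun kind => if ((PySem.Dict.mk ed).get? "gender" == some "F") then kind else shift) with
              | none => s
              | some t => stepTok s t
        cases TOKEN_KIND_alt.get? shift with
        | none => rfl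
        | some kind => rfl
  have htokens : ROTATION_HISTORY_CORE_DAYS_py.foldl (fun (acc : List String) (day : String) =>
      if (PySem.Set.ofList (ig.getD [])).contains day then acc
      else match rotation_token_for_shift_py ((PySem.Dict.mk ws).get? day) ed with
        | some t => if t = "" then acc else acc ++ [t]
        | none => acc) []
    = CORE_DAYS_alt.flatMap (fun d => (tokenOf ((PySem.Dict.mk ed).get? "gender" == some "F") ws (PySem.Set.ofList (ig.getD [])) d).toList) := by
    rw [hfunA]
    rw [show ROTATION_HISTORY_CORE_DAYS_py = CORE_DAYS_alt from rfl]
    rw [tokensA_flatMap]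
    simp
  have hBf : CORE_DAYS_alt.foldl (fun (s : PySem.Dict String Int × Option String × Int) (day : String) =>
      if (PySem.Set.ofList (ig.getD [])).contains day then s
      else match (PySem.Dict.mk ws).get? day with
        | none => s
        | some shift =>
          match TOKEN_KIND_alt.get? shift with
          | none => s
          | some kind =>
            let token := if ((PySem.Dict.mk ed).get? "gender" == some "F") then kind else shift
            let c := s.1.getD token 0 + 1
            let counts := s.1.insert token c
            if s.2.2 ≤ c then (counts, some token, c) else (counts, s.2.1, s.2.2))
      ((PySem.Dict.empty : PySem.Dict String Int), (none : Option String), (0 : Int))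
    = ((CORE_DAYS_alt.flatMap (fun d => (tokenOf ((PySem.Dict.mk ed).get? "gender" == some "F") ws (PySem.Set.ofList (ig.getD [])) d).toList)).foldl stepTok
        ((PySem.Dict.empty : PySem.Dict String Int), (none : Option String), (0 : Int))) := by
    rw [hfunB]
    exact fold_opt _ _ _ _
  exact ((congrArg (fun l : List String =>
      if l = [] then none
      else
        match PySem.List.max? (PySem.Dict.counter l).values (fun x => x) with
        | none => none
        | some top =>
          match l.reverse.find? (fun t => (PySem.Dict.counter l).getD t 0 == top) with
          | some t => some t
          | none => PySem.List.pyGet? l (-1)) htokens).trans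
    ((pv_sel_eq _).trans (congrArg (fun st : PySem.Dict String Int × Option String × Int => st.2.1) hBf.symm)))
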